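-- pv_equiv track=rewrite | github.com/JasonLin43212/usaco | training/1/friday_the_thirteenth/friday.py | get_friday_frequency
-- ===== SOURCE A (Python) =====
-- def is_leap(year):
--     if year % 400 == 0:
--         return True
--     elif year % 100 == 0:
--         return False
--     return year % 4 == 0
--
-- def compute_friday(first_date, month, year):
--     leap = is_leap(year)
--     if month == 2:
--         num_days = 29 if leap else 28
--     elif month in {4, 6, 9, 11}:
--         num_days = 30
--     else:
--         num_days = 31
--     return (first_date + 12) % 7, (first_date + num_days) % 7
--
-- def get_friday_frequency(n):
--     friday_freq = [0, 0, 0, 0, 0, 0, 0]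
--     first_date = 2
--     month = 1
--     year = 1900
--
--     while year < 1900 + n:
--         fri_index, first_date = compute_friday(first_date, month, year)
--         friday_freq[fri_index] += 1
--         month += 1
--         if month == 13:
--             month = 1
--             year += 1
--
--     return friday_freq
-- ===== SOURCE B (Python) =====
-- def _days_in_month(month, year):
--     if month == 2:
--         if year % 4 == 0 and (year % 100 != 0 or year % 400 == 0):
--             return 29
--         return 28
--     if month in (4, 6, 9, 11):
--         return 30
--     return 31
--
-- def _sim(years):
--     # weekday counts of the 13ths over `years` years starting 1900 (Jan 13, 1900 has index (2+5)%7)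
--     freq = [0] * 7
--     dow = 2
--     for y in range(years):
--         for month in range(1, 13):
--             freq[(dow + 5) % 7] += 1
--             dow = (dow + _days_in_month(month, 1900 + y)) % 7
--     return freq
--
-- def get_friday_frequency(n):
--     if n <= 0:
--         return [0] * 7
--     q, r = divmod(n, 400)
--     cycle = _sim(400)
--     rem = _sim(r)
--     return [q * c + x for c, x in zip(cycle, rem)]
-- ===== Notes on version B (the rewrite author's own statement) =====
-- stated objective: faster
-- what changed: A walks month by month through all n years; B exploits the 400-year periodicity of the Gregorian calendar: it simulates one 400-year cycle and the n mod 400 remainder years once, then combines them as q*cycle + remainder.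
import Mathlib
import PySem

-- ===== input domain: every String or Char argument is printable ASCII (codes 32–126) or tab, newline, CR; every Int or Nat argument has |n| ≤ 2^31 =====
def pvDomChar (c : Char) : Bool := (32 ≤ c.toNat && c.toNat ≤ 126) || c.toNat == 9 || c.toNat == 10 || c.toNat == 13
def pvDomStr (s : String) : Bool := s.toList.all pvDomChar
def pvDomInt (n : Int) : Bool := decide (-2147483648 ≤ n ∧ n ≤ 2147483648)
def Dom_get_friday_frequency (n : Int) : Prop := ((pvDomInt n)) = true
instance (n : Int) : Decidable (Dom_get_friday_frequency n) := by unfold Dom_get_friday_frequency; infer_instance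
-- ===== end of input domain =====

-- B replaces A's month-by-month walk over all n years by one walk over a single 400-year
-- Gregorian cycle plus the remainder years; equal return value for every n.

-- ===== PORT A =====
def is_leap (year : Int) : Bool :=
  if PySem.Int.mod year 400 == 0 then true
  else if PySem.Int.mod year 100 == 0 then false
  else PySem.Int.mod year 4 == 0

def compute_friday (first_date month year : Int) : Int × Int :=
  let leap := is_leap year
  let num_days : Int :=
    if month == 2 then (if leap then 29 else 28)
    else if month == 4 || month == 6 || month == 9 || month == 11 then 30
    else 31
  (PySem.Int.mod (first_date + 12) 7, PySem.Int.mod (first_date + num_days) 7)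

-- the while loop; fuel = exact number of iterations (12 per year); the index fri_index is
-- always in [0,7) (x % 7 with positive divisor), so `modify` is exact for `freq[i] += 1`
def loopA : Nat → List Int → Int → Int → Int → Int → List Int
  | 0, friday_freq, _, _, _, _ => friday_freq
  | (fuel+1), friday_freq, first_date, month, year, n =>
    if year < 1900 + n then
      let p := compute_friday first_date month year
      let friday_freq' := friday_freq.modify p.1.toNat (· + 1)
      let month' := month + 1
      if month' == 13 then loopA fuel friday_freq' p.2 1 (year + 1) n
      else loopA fuel friday_freq' p.2 month' year n
    else friday_freq

def get_friday_frequency (n : Int) : List Int :=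
  loopA (12 * n.toNat) [0, 0, 0, 0, 0, 0, 0] 2 1 1900 n

-- ===== PORT B =====
def is_leapB (year : Int) : Bool :=
  PySem.Int.mod year 4 == 0 && (PySem.Int.mod year 100 != 0 || PySem.Int.mod year 400 == 0)

def days_in_month (month year : Int) : Int :=
  if month == 2 then (if is_leapB year then 29 else 28)
  else if month == 4 || month == 6 || month == 9 || month == 11 then 30
  else 31

-- the inner `for month in range(1, 13)` loop of _sim
def simB_year (year : Int) (s : List Int × Int) : List Int × Int :=
  (PySem.List.pyRange 1 13 1).foldl
    (fun t m =>
      (t.1.modify (PySem.Int.mod (t.2 + 5) 7).toNat (· + 1),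
       PySem.Int.mod (t.2 + days_in_month m year) 7))
    s

-- _sim(years): the outer `for y in range(years)` loop
def simB (years : Int) : List Int :=
  ((PySem.List.pyRange 0 years 1).foldl (fun s y => simB_year (1900 + y) s)
    ([0, 0, 0, 0, 0, 0, 0], 2)).1

def get_friday_frequency_alt (n : Int) : List Int :=
  if n ≤ 0 then [0, 0, 0, 0, 0, 0, 0]
  else
    let q := PySem.Int.floordiv n 400
    let r := PySem.Int.mod n 400
    let cycle := simB 400
    let rem := simB r
    (cycle.zip rem).map (fun p => q * p.1 + p.2)

-- ===== PRECONDITION & SPEC =====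
def Spec_get_friday_frequency (n : Int) (out : List Int) : Prop := out = get_friday_frequency_alt n
instance (n : Int) (out : List Int) : Decidable (Spec_get_friday_frequency n out) := by unfold Spec_get_friday_frequency; infer_instance

-- ===== CLAIM (what is proved, stated in full; the proofs are below) =====
def Claim_equal_get_friday_frequency : Prop := ∀ (n : Int), Dom_get_friday_frequency n → Spec_get_friday_frequency n (get_friday_frequency n)

-- ===== LEMMAS AND PROOFS =====

-- reference simulation at year granularity, built from B's inner-loop helper
def simR : Nat → Int → (List Int × Int) → (List Int × Int)
  | 0, _, s => s
  | (k+1), y, s => simR k (y + 1) (simB_year y s)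

-- reference simulation at month granularity, built from A's helper
def simM : Nat → Int → Int → Int → List Int → List Int × Int
  | 0, _, _, d, f => (f, d)
  | (j+1), m, y, d, f =>
    let p := compute_friday d m y
    let f' := f.modify p.1.toNat (· + 1)
    if m + 1 == 13 then simM j 1 (y + 1) p.2 f' else simM j (m + 1) y p.2 f'

lemma hr13 : PySem.List.pyRange 1 13 1 = [1, 2, 3, 4, 5, 6, 7, 8, 9, 10, 11, 12] := by decide

lemma zip_replicate_zero : ∀ (l : List Int), List.zipWith (· + ·) l (List.replicate l.length 0) = l := by
  intro l
  induction l with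
  | nil => rfl
  | cons a l ih => simp [List.replicate_succ, ih]

-- A's leap test agrees with B's
lemma leap_eq (y : Int) : is_leap y = is_leapB y := by
  unfold is_leap is_leapB
  rw [PySem.Int.mod_eq_emod_of_pos (by norm_num : (0:Int) < 400),
      PySem.Int.mod_eq_emod_of_pos (by norm_num : (0:Int) < 100),
      PySem.Int.mod_eq_emod_of_pos (by norm_num : (0:Int) < 4)]
  by_cases h4 : y % 4 = 0 <;> by_cases h1 : y % 100 = 0 <;> by_cases h0 : y % 400 = 0 <;>
    simp [h4, h1, h0] <;> omega

lemma mod7_shift (d : Int) : PySem.Int.mod (d + 12) 7 = PySem.Int.mod (d + 5) 7 := by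
  rw [PySem.Int.mod_eq_emod_of_pos (by norm_num : (0:Int) < 7),
      PySem.Int.mod_eq_emod_of_pos (by norm_num : (0:Int) < 7)]
  omega

-- A's helper computes B's index and B's month length
lemma month_eq (d m y : Int) :
    compute_friday d m y = (PySem.Int.mod (d + 5) 7, PySem.Int.mod (d + days_in_month m y) 7) := by
  simp only [compute_friday, days_in_month, leap_eq, mod7_shift]

-- A's while loop is simM while the loop condition holds
lemma loopA_eq_simM : ∀ (j : Nat) (f : List Int) (d m y n : Int),
    1 ≤ m → m ≤ 12 → (j : Int) = 12 * (1900 + n - y) - (m - 1) →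
    loopA j f d m y n = (simM j m y d f).1 := by
  intro j
  induction j with
  | zero => intro f d m y n _ _ _; rfl
  | succ j ih =>
    intro f d m y n h1 h2 hj
    have hy : y < 1900 + n := by push_cast at hj; omega
    by_cases hm : m = 12
    · subst hm
      simp only [loopA, simM, if_pos hy]
      norm_num
      exact ih _ _ 1 (y + 1) n (by norm_num) (by norm_num) (by push_cast at hj ⊢; omega)
    · have hc : ¬(((m + 1 : Int) == 13) = true) := by simp; omega
      simp only [loopA, simM, if_pos hy, if_neg hc]
      exact ih _ _ (m + 1) y n (by omega) (by omega) (by push_cast at hj ⊢; omega)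

-- 12 months make a year
lemma simM_12 : ∀ (k : Nat) (y d : Int) (f : List Int), simM (12 * k) 1 y d f = simR k y (f, d) := by
  intro k
  induction k with
  | zero => intro y d f; rfl
  | succ k ih =>
    intro y d f
    rw [show 12 * (k + 1) = 12*k+1+1+1+1+1+1+1+1+1+1+1+1 from by ring]
    simp [simM, month_eq, simR, simB_year, hr13, ih]

-- simB is simR
lemma simB_eq_simR : ∀ (k : Nat) (a : Int) (s : List Int × Int),
    (PySem.List.pyRange a (a + (k : Int)) 1).foldl (fun s y => simB_year (1900 + y) s) s
      = simR k (1900 + a) s := by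
  intro k
  induction k with
  | zero =>
    intro a s
    rw [PySem.List.pyRange_one_eq_nil (by push_cast; omega)]
    rfl
  | succ k ih =>
    intro a s
    rw [PySem.List.pyRange_one_cons (by push_cast; omega)]
    simp only [List.foldl_cons]
    rw [show a + ((k : Nat) + 1 : Nat) = (a + 1) + (k : Int) from by push_cast; ring]
    rw [ih (a + 1) (simB_year (1900 + a) s)]
    show simR k (1900 + (a + 1)) _ = simR (k + 1) (1900 + a) s
    rw [show (1900 : Int) + (a + 1) = (1900 + a) + 1 from by ring]
    rfl

lemma simB_eq (m : Nat) : simB (m : Int) = (simR m 1900 ([0, 0, 0, 0, 0, 0, 0], 2)).1 := by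
  unfold simB
  rw [show (m : Int) = 0 + (m : Int) from by ring, simB_eq_simR m 0]
  norm_num

-- year shift by 400 is invisible (the Gregorian leap rule has period 400)
lemma days_400 (m y : Int) : days_in_month m (y + 400) = days_in_month m y := by
  have h4 : (4 ∣ y + 400) ↔ (4 ∣ y) := by omega
  have h100 : (100 ∣ y + 400) ↔ (100 ∣ y) := by omega
  simp [days_in_month, is_leapB, h4, h100]

lemma simB_year_400 (y : Int) (s : List Int × Int) : simB_year (y + 400) s = simB_year y s := by
  unfold simB_year
  have h : (fun (t : List Int × Int) m =>
        (t.1.modify (PySem.Int.mod (t.2 + 5) 7).toNat (· + 1),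
         PySem.Int.mod (t.2 + days_in_month m (y + 400)) 7))
      = (fun (t : List Int × Int) m =>
        (t.1.modify (PySem.Int.mod (t.2 + 5) 7).toNat (· + 1),
         PySem.Int.mod (t.2 + days_in_month m y) 7)) := by
    funext t m; rw [days_400]
  rw [h]

lemma simR_400 : ∀ (k : Nat) (y : Int) (s : List Int × Int), simR k (y + 400) s = simR k y s := by
  intro k
  induction k with
  | zero => intro y s; rfl
  | succ k ih =>
    intro y s
    simp only [simR]
    rw [simB_year_400, show y + 400 + 1 = (y + 1) + 400 from by ring]
    exact ih (y + 1) _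

-- composition
lemma simR_add : ∀ (a b : Nat) (y : Int) (s : List Int × Int),
    simR (a + b) y s = simR b (y + (a : Int)) (simR a y s) := by
  intro a
  induction a with
  | zero => intro b y s; norm_num [simR]
  | succ a ih =>
    intro b y s
    rw [show a + 1 + b = (a + b) + 1 from by omega]
    show simR (a + b) (y + 1) (simB_year y s) = _
    rw [ih b (y + 1) (simB_year y s)]
    show simR b (y + 1 + (a : Int)) _ = simR b (y + ((a : Nat) + 1 : Nat)) _
    rw [show y + 1 + (a : Int) = y + ((a : Nat) + 1 : Nat) from by push_cast; ring]
    rfl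

-- the frequency list is threaded additively
lemma modify_zipWith (f g : List Int) (i : Nat) :
    (List.zipWith (· + ·) f g).modify i (· + 1) = List.zipWith (· + ·) f (g.modify i (· + 1)) := by
  apply List.ext_getElem
  · simp
  · intro j h1 h2
    simp only [List.getElem_modify, List.getElem_zipWith]
    split_ifs <;> ring

lemma foldl_lin (y : Int) : ∀ (l : List Int) (d : Int) (f g : List Int),
    l.foldl (fun t m =>
        (t.1.modify (PySem.Int.mod (t.2 + 5) 7).toNat (· + 1),
         PySem.Int.mod (t.2 + days_in_month m y) 7)) (List.zipWith (· + ·) f g, d)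
      = (List.zipWith (· + ·) f
          ((l.foldl (fun t m =>
            (t.1.modify (PySem.Int.mod (t.2 + 5) 7).toNat (· + 1),
             PySem.Int.mod (t.2 + days_in_month m y) 7)) (g, d)).1),
         (l.foldl (fun t m =>
            (t.1.modify (PySem.Int.mod (t.2 + 5) 7).toNat (· + 1),
             PySem.Int.mod (t.2 + days_in_month m y) 7)) (g, d)).2) := by
  intro l
  induction l with
  | nil => intro d f g; rfl
  | cons m l ih =>
    intro d f g
    simp only [List.foldl_cons]
    rw [modify_zipWith]
    exact ih (PySem.Int.mod (d + days_in_month m y) 7) f (g.modify (PySem.Int.mod (d + 5) 7).toNat (· + 1))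

lemma simB_year_lin (y d : Int) (f g : List Int) :
    simB_year y (List.zipWith (· + ·) f g, d)
      = (List.zipWith (· + ·) f (simB_year y (g, d)).1, (simB_year y (g, d)).2) :=
  foldl_lin y _ d f g

lemma simR_lin : ∀ (k : Nat) (y d : Int) (f g : List Int),
    simR k y (List.zipWith (· + ·) f g, d)
      = (List.zipWith (· + ·) f (simR k y (g, d)).1, (simR k y (g, d)).2) := by
  intro k
  induction k with
  | zero => intro y d f g; rfl
  | succ k ih =>
    intro y d f g
    simp only [simR]
    rw [simB_year_lin]
    exact ih (y + 1) (simB_year y (g, d)).2 f (simB_year y (g, d)).1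

-- lengths
lemma foldl_len (y : Int) : ∀ (l : List Int) (s : List Int × Int),
    ((l.foldl (fun t m =>
        (t.1.modify (PySem.Int.mod (t.2 + 5) 7).toNat (· + 1),
         PySem.Int.mod (t.2 + days_in_month m y) 7)) s).1).length = s.1.length := by
  intro l
  induction l with
  | nil => intro s; rfl
  | cons m l ih =>
    intro s
    simp only [List.foldl_cons]
    rw [ih]
    simp

lemma simB_year_len (y : Int) (s : List Int × Int) : (simB_year y s).1.length = s.1.length :=
  foldl_len y _ s

lemma simR_len : ∀ (k : Nat) (y : Int) (s : List Int × Int), (simR k y s).1.length = s.1.length := by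
  intro k
  induction k with
  | zero => intro y s; rfl
  | succ k ih =>
    intro y s
    simp only [simR]
    rw [ih, simB_year_len]

-- the final weekday of the simulation ignores the frequency list …
def dowY (y d : Int) : Int :=
  (PySem.List.pyRange 1 13 1).foldl (fun t m => PySem.Int.mod (t + days_in_month m y) 7) d

def dowR : Nat → Int → Int → Int
  | 0, _, d => d
  | (k+1), y, d => dowR k (y + 1) (dowY y d)

lemma foldl_snd (y : Int) : ∀ (l : List Int) (s : List Int × Int),
    ((l.foldl (fun t m =>
        (t.1.modify (PySem.Int.mod (t.2 + 5) 7).toNat (· + 1),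
         PySem.Int.mod (t.2 + days_in_month m y) 7)) s).2)
      = l.foldl (fun t m => PySem.Int.mod (t + days_in_month m y) 7) s.2 := by
  intro l
  induction l with
  | nil => intro s; rfl
  | cons m l ih =>
    intro s
    simp only [List.foldl_cons]
    exact ih _

lemma simB_year_snd (y : Int) (s : List Int × Int) : (simB_year y s).2 = dowY y s.2 :=
  foldl_snd y _ s

lemma simR_snd : ∀ (k : Nat) (y : Int) (s : List Int × Int), (simR k y s).2 = dowR k y s.2 := by
  intro k
  induction k with
  | zero => intro y s; rfl
  | succ k ih =>
    intro y s
    simp only [simR, dowR]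
    rw [ih, simB_year_snd]

-- … and a year advances it by 365 or 366 days
def dowL : Nat → Int → Int → Int
  | 0, _, d => d
  | (k+1), y, d => dowL k (y + 1) (PySem.Int.mod (d + (if is_leapB y then 366 else 365)) 7)

lemma dowY_eq (y d : Int) : dowY y d = PySem.Int.mod (d + (if is_leapB y then 366 else 365)) 7 := by
  simp only [dowY, hr13, List.foldl, days_in_month]
  norm_num
  split_ifs <;> omega

lemma dowR_eq_dowL : ∀ (k : Nat) (y d : Int), dowR k y d = dowL k y d := by
  intro k
  induction k with
  | zero => intro y d; rfl
  | succ k ih =>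
    intro y d
    simp only [dowR, dowL]
    rw [dowY_eq, ih]

set_option maxRecDepth 1000000 in
lemma dL400 : dowL 400 1900 2 = 2 := by decide

-- the weekday returns to its start after one 400-year cycle
lemma cycle_dow : (simR 400 1900 ([0, 0, 0, 0, 0, 0, 0], 2)).2 = 2 := by
  rw [simR_snd, dowR_eq_dowL]
  exact dL400

-- q cycles plus a remainder
lemma cycles (q r : Nat) :
    (simR (400 * q + r) 1900 ([0, 0, 0, 0, 0, 0, 0], 2)).1
      = List.zipWith (fun c x => (q : Int) * c + x)
          ((simR 400 1900 ([0, 0, 0, 0, 0, 0, 0], 2)).1)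
          ((simR r 1900 ([0, 0, 0, 0, 0, 0, 0], 2)).1) := by
  induction q with
  | zero =>
    rw [show 400 * 0 + r = r from by omega]
    apply List.ext_getElem
    · simp [List.length_zipWith, simR_len]
    · intro i h1 h2
      simp [List.getElem_zipWith]
  | succ q ih =>
    rw [show 400 * (q + 1) + r = 400 + (400 * q + r) from by omega]
    rw [simR_add]
    rw [show (1900 : Int) + ((400 : Nat) : Int) = 1900 + 400 from by norm_num]
    rw [simR_400]
    have hpair : simR 400 1900 ([0, 0, 0, 0, 0, 0, 0], 2)
        = ((simR 400 1900 ([0, 0, 0, 0, 0, 0, 0], 2)).1, 2) := by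
      apply Prod.ext <;> simp [cycle_dow]
    conv_lhs => rw [hpair]
    have hlen : (simR 400 1900 ([0, 0, 0, 0, 0, 0, 0], 2)).1.length = 7 := by
      rw [simR_len]
      rfl
    have hCz : (simR 400 1900 ([0, 0, 0, 0, 0, 0, 0], 2)).1
        = List.zipWith (· + ·) (simR 400 1900 ([0, 0, 0, 0, 0, 0, 0], 2)).1 [0, 0, 0, 0, 0, 0, 0] := by
      conv_lhs => rw [← zip_replicate_zero (simR 400 1900 ([0, 0, 0, 0, 0, 0, 0], 2)).1]
      rw [hlen]
      rfl
    conv_lhs => rw [hCz]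
    rw [simR_lin]
    simp only
    rw [ih]
    apply List.ext_getElem
    · simp [List.length_zipWith, simR_len]
    · intro i h1 h2
      simp only [List.getElem_zipWith]
      push_cast
      ring

lemma zip_map_eq_zipWith (q : Int) : ∀ (l l' : List Int),
    (l.zip l').map (fun p => q * p.1 + p.2) = List.zipWith (fun c x => q * c + x) l l' := by
  intro l
  induction l with
  | nil => intro l'; rfl
  | cons a l ih =>
    intro l'
    cases l' with
    | nil => rfl
    | cons b l' => simp [ih]

-- ===== VERDICT (by name: the statement is the Claim_ definition above) =====
theorem get_friday_frequency_spec : Claim_equal_get_friday_frequency := by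
  intro n _
  show get_friday_frequency n = get_friday_frequency_alt n
  by_cases hn : n ≤ 0
  · have h0 : n.toNat = 0 := Int.toNat_of_nonpos hn
    simp [get_friday_frequency, get_friday_frequency_alt, h0, hn, loopA]
  · have hn' : 0 < n := by omega
    have hB : get_friday_frequency_alt n
        = ((simB 400).zip (simB (PySem.Int.mod n 400))).map
            (fun p => PySem.Int.floordiv n 400 * p.1 + p.2) := by
      unfold get_friday_frequency_alt
      rw [if_neg (by omega)]
    have hA : get_friday_frequency n = (simM (12 * n.toNat) 1 1900 2 [0, 0, 0, 0, 0, 0, 0]).1 := by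
      unfold get_friday_frequency
      exact loopA_eq_simM _ _ 2 1 1900 n (by norm_num) (by norm_num) (by push_cast; omega)
    have hq : PySem.Int.floordiv n 400 = n / 400 := PySem.Int.floordiv_eq_ediv_of_pos (by norm_num)
    have hr : PySem.Int.mod n 400 = n % 400 := PySem.Int.mod_eq_emod_of_pos (by norm_num)
    have hnt : n.toNat = 400 * (PySem.Int.floordiv n 400).toNat + (PySem.Int.mod n 400).toNat := by
      rw [hq, hr]; omega
    have hrB : simB (PySem.Int.mod n 400)
        = (simR (PySem.Int.mod n 400).toNat 1900 ([0, 0, 0, 0, 0, 0, 0], 2)).1 := by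
      conv_lhs => rw [show PySem.Int.mod n 400 = (((PySem.Int.mod n 400).toNat : Nat) : Int) from by
        rw [hr]; omega]
      exact simB_eq _
    have hcB : simB 400 = (simR 400 1900 ([0, 0, 0, 0, 0, 0, 0], 2)).1 := by
      rw [show (400 : Int) = ((400 : Nat) : Int) from by norm_num]
      exact simB_eq 400
    rw [hA, hB, simM_12, hnt, cycles, zip_map_eq_zipWith, hrB, hcB,
        show ((PySem.Int.floordiv n 400).toNat : Int) = PySem.Int.floordiv n 400 from by
          rw [hq]; omega]
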